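-- pv_equiv track=rewrite | github.com/rnium/sec_ugrp | results/pdf_generators/scorelist_generator.py | get_examiner_table_rows
-- ===== SOURCE A (Python) =====
-- def get_examiner_table_rows(excel_data):
--     examiners = excel_data['examiners']
--     examiners_exterternal = excel_data['external_examiners']
--     table = []
--     for i in range(0,max(len(examiners), len(examiners_exterternal)),2):
--         e1 = examiners[i:i+2]
--         for _ in range(2-len(e1)):
--             e1.append("")
--         e2 = examiners_exterternal[i:i+2]
--         for _ in range(2-len(e2)):
--             e2.insert(0, "")
--         table.append([*e1, *e2])
--     return table
-- ===== SOURCE B (Python) =====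
-- def get_examiner_table_rows(excel_data):
--     ex = list(excel_data['examiners'])
--     ext = list(excel_data['external_examiners'])
--     n = max(len(ex), len(ext))
--     n += n % 2
--     if len(ext) % 2:
--         ext.insert(len(ext) - 1, "")
--     ex = ex + [""] * (n - len(ex))
--     ext = ext + [""] * (n - len(ext))
--     i1, i2 = iter(ex), iter(ext)
--     return [[a, b, c, d] for a, b, c, d in zip(i1, i1, i2, i2)]
-- ===== Notes on version B (the rewrite author's own statement) =====
-- stated objective: alternative
-- what changed: A slices and pads a fresh pair of 2-chunks inside every loop iteration; B never chunks: it normalizes both flat lists up front (one '' inserted before the last external when their count is odd, then both lists right-padded to a common even length) and reshapes the two flat lists into 4-column rows with a single iterator zip.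
import Mathlib
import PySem

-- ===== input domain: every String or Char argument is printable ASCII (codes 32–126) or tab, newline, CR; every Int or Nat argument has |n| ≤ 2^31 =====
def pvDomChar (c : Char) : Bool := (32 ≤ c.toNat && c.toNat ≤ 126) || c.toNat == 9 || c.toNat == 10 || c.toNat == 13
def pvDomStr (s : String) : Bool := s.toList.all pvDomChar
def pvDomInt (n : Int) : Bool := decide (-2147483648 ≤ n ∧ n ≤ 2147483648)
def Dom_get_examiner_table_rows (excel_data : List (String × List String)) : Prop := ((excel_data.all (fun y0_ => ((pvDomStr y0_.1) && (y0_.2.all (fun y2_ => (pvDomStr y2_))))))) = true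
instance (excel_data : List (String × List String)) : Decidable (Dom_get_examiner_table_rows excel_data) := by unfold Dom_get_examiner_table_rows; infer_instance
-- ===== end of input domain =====

-- B replaces A's per-iteration slice-and-pad loop by a flat normalization (one '' inserted
-- before the last external when odd, both lists padded to a common even length) followed by
-- a single reshape of the two flat lists into 4-column rows.

-- ===== PORT A =====
-- the for-loop of A over range(0, max(len,len), 2)
def pvRowsA (examiners exts : List String) : List (List String) :=
  (PySem.List.pyRange 0 ((max examiners.length exts.length : Nat) : Int) 2).foldl
    (fun table i =>
      let e1 := PySem.List.slice examiners (some i) (some (i + 2))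
      let e1 := e1 ++ List.replicate (2 - e1.length) ""
      let e2 := PySem.List.slice exts (some i) (some (i + 2))
      let e2 := List.replicate (2 - e2.length) "" ++ e2
      table ++ [e1 ++ e2]) []

def get_examiner_table_rows (excel_data : List (String × List String)) : List (List String) :=
  match (PySem.Dict.mk excel_data).get? "examiners",
        (PySem.Dict.mk excel_data).get? "external_examiners" with
  | some examiners, some exts => pvRowsA examiners exts
  | _, _ => []

-- ===== PORT B =====
-- the list comprehension over zip(i1, i1, i2, i2): consume 2 + 2 elements per row
def pvRows4 : List String → List String → List (List String)
  | a :: b :: t1, c :: d :: t2 => [a, b, c, d] :: pvRows4 t1 t2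
  | _, _ => []

def pvRowsB (exIn extIn : List String) : List (List String) :=
  let n0 := max exIn.length extIn.length
  let n := n0 + n0 % 2
  let ext := if extIn.length % 2 = 1
    then PySem.List.insert extIn ((extIn.length : Int) - 1) "" else extIn
  let ex := exIn ++ List.replicate (n - exIn.length) ""
  let ext := ext ++ List.replicate (n - ext.length) ""
  pvRows4 ex ext

def get_examiner_table_rows_alt (excel_data : List (String × List String)) : List (List String) :=
  match (PySem.Dict.mk excel_data).get? "examiners" with
  | none => []
  | some examiners =>
  match (PySem.Dict.mk excel_data).get? "external_examiners" with
  | none => []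
  | some exts => pvRowsB examiners exts

-- ===== PRECONDITION & SPEC =====
-- Pre_ excludes exactly the dicts missing the key 'examiners' or 'external_examiners',
-- on which the Python A raises KeyError (B raises there too).
def Pre_get_examiner_table_rows (excel_data : List (String × List String)) : Prop :=
  ((PySem.Dict.mk excel_data).get? "examiners").isSome = true ∧
  ((PySem.Dict.mk excel_data).get? "external_examiners").isSome = true
instance (excel_data : List (String × List String)) : Decidable (Pre_get_examiner_table_rows excel_data) := by unfold Pre_get_examiner_table_rows; infer_instance

def pvWitness_get_examiner_table_rows : (List (String × List String)) :=
  [("examiners", ["a", "b", "c"]), ("external_examiners", ["x"])]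

def Spec_get_examiner_table_rows (excel_data : List (String × List String)) (out : List (List String)) : Prop := out = get_examiner_table_rows_alt excel_data
instance (excel_data : List (String × List String)) (out : List (List String)) : Decidable (Spec_get_examiner_table_rows excel_data out) := by unfold Spec_get_examiner_table_rows; infer_instance

-- ===== CLAIM (what is proved, stated in full; the proofs are below) =====
def Claim_equal_get_examiner_table_rows : Prop := ∀ (excel_data : List (String × List String)), Dom_get_examiner_table_rows excel_data → Pre_get_examiner_table_rows excel_data → Spec_get_examiner_table_rows excel_data (get_examiner_table_rows excel_data)

-- ===== LEMMAS AND PROOFS =====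

-- proof-only helpers: the 2-chunk of l at index k, the two paddings
def pvChunk (l : List String) (k : Nat) : List String := (l.drop (2 * k)).take 2
def pvPadR (t : List String) : List String := t ++ List.replicate (2 - t.length) ""
def pvPadL (t : List String) : List String := List.replicate (2 - t.length) "" ++ t

theorem pvMapRange2 {α : Type} (m : Nat) (f : Int → α) :
    (PySem.List.pyRange 0 (m : Int) 2).map f
      = (List.range ((m + 1) / 2)).map (fun (k : Nat) => f (2 * (k : Int))) := by
  rw [PySem.List.pyRange_of_pos 0 m (by norm_num), List.map_map]
  have h : (if (0:Int) < (m:Int) then (((m:Int) - 0 + 2 - 1) / 2).toNat else 0) = (m + 1) / 2 := by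
    split <;> omega
  rw [h]
  simp

theorem pvSliceChunk (l : List String) (k : Nat) :
    PySem.List.slice l (some (2 * (k : Int))) (some (2 * (k : Int) + 2)) = pvChunk l k := by
  have h1 : (2 * (k : Int)) = ((2 * k : Nat) : Int) := by push_cast; ring
  have h2 : (2 * (k : Int) + 2) = ((2 * k : Nat) : Int) + ((2 : Nat) : Int) := by push_cast; ring
  rw [h2, h1, PySem.List.slice_natCast_add]
  rfl

theorem pvRowsA_norm (ex ext : List String) :
    pvRowsA ex ext
      = (List.range ((max ex.length ext.length + 1) / 2)).map
          (fun k => pvPadR (pvChunk ex k) ++ pvPadL (pvChunk ext k)) := by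
  unfold pvRowsA
  rw [PySem.List.foldl_append_singleton_eq_map
    (f := fun i => (PySem.List.slice ex (some i) (some (i + 2)) ++
        List.replicate (2 - (PySem.List.slice ex (some i) (some (i + 2))).length) "") ++
      (List.replicate (2 - (PySem.List.slice ext (some i) (some (i + 2))).length) "" ++
        PySem.List.slice ext (some i) (some (i + 2))))]
  rw [pvMapRange2]
  simp only [List.nil_append]
  apply List.map_congr_left
  intro k _
  rw [pvSliceChunk, pvSliceChunk]
  rfl

theorem pvChunkLen (l : List String) (k : Nat) :
    (pvChunk l k).length = min 2 (l.length - 2 * k) := by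
  simp [pvChunk]

-- chunk k of a right-padded list is the right-padded chunk k of the original
theorem pvChunkPadR (l : List String) (n k : Nat) (h1 : l.length ≤ n) (h2 : 2 * k + 2 ≤ n) :
    pvChunk (l ++ List.replicate (n - l.length) "") k = pvPadR (pvChunk l k) := by
  have hd : (l ++ List.replicate (n - l.length) "").drop (2 * k)
      = l.drop (2 * k) ++ List.replicate (n - l.length - (2 * k - l.length)) "" := by
    rw [List.drop_append, List.drop_replicate]
  have hlen : (l.drop (2 * k)).length = l.length - 2 * k := by simp
  unfold pvChunk pvPadR
  rcases ht : l.drop (2 * k) with _ | ⟨a, _ | ⟨b, t'⟩⟩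
  · rw [ht] at hlen
    simp only [List.length_nil] at hlen
    rw [hd, ht, List.nil_append, List.take_replicate]
    have hm : min 2 (n - l.length - (2 * k - l.length)) = 2 := by omega
    rw [hm]
    rfl
  · rw [ht] at hlen
    simp only [List.length_cons, List.length_nil] at hlen
    rw [hd, ht, List.cons_append, List.take_succ_cons, List.nil_append, List.take_replicate]
    have hm : min 1 (n - l.length - (2 * k - l.length)) = 1 := by omega
    rw [hm]
    rfl
  · rw [hd, ht]
    rfl

-- for an even-length list every chunk has length 0 or 2, so both paddings agree
theorem pvPadLR_even (l : List String) (k : Nat) (h : l.length % 2 = 0) :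
    pvPadL (pvChunk l k) = pvPadR (pvChunk l k) := by
  have hlen := pvChunkLen l k
  cases ht : pvChunk l k with
  | nil => rfl
  | cons a t =>
    cases t with
    | nil =>
      rw [ht] at hlen
      simp only [List.length_cons, List.length_nil] at hlen
      omega
    | cons b t' =>
      have h2 : (pvChunk l k).length ≤ 2 := by rw [pvChunkLen]; omega
      rw [ht] at h2
      simp only [List.length_cons] at h2
      have : t' = [] := List.eq_nil_of_length_eq_zero (by omega)
      subst this
      rfl

-- chunk k of the '' -inserted-and-padded odd external list is the left-padded chunk k
theorem pvChunkExtOdd (l : List String) (n k : Nat) (hodd : l.length % 2 = 1)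
    (_h1 : l.length + 1 ≤ n) (h2 : 2 * k + 2 ≤ n) :
    pvChunk ((l.take (l.length - 1) ++ "" :: l.drop (l.length - 1))
        ++ List.replicate (n - (l.length + 1)) "") k = pvPadL (pvChunk l k) := by
  have hL1 : 1 ≤ l.length := by omega
  have hPlen : (l.take (l.length - 1)).length = l.length - 1 := by
    simp only [List.length_take]; omega
  have hdlen : (l.drop (l.length - 1)).length = 1 := by
    simp only [List.length_drop]; omega
  by_cases hk : 2 * k + 2 ≤ l.length - 1
  · -- the chunk lies fully inside the untouched prefix
    unfold pvChunk
    rw [List.append_assoc, List.drop_append_of_le_length (by omega),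
        List.take_append_of_le_length (by simp only [List.length_drop, hPlen]; omega)]
    have hsame : ((l.take (l.length - 1)).drop (2 * k)).take 2 = (l.drop (2 * k)).take 2 := by
      rw [List.drop_take, List.take_take]
      congr 1
      omega
    rw [hsame]
    unfold pvPadL
    have h2' : ((l.drop (2 * k)).take 2).length = 2 := by
      simp only [List.length_take, List.length_drop]; omega
    rw [h2']
    rfl
  · by_cases hk2 : 2 * k + 2 ≤ l.length + 1
    · -- the chunk starting at the inserted "": 2*k = l.length - 1
      have hke : 2 * k = l.length - 1 := by omega
      unfold pvChunk
      have hstep : ((l.take (l.length - 1) ++ "" :: l.drop (l.length - 1))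
          ++ List.replicate (n - (l.length + 1)) "").drop (2 * k)
          = "" :: l.drop (l.length - 1) ++ List.replicate (n - (l.length + 1)) "" := by
        rw [List.append_assoc, hke,
            List.drop_append_of_le_length (by rw [hPlen]),
            List.drop_eq_nil_of_le (by rw [hPlen]), List.nil_append]
      rw [hstep, List.cons_append, List.take_succ_cons,
          List.take_append_of_le_length (by omega),
          List.take_of_length_le (by omega), hke,
          List.take_of_length_le (by omega)]
      unfold pvPadL
      rw [hdlen]
      rfl
    · -- the chunk lies entirely in the replicate padding
      have hge : l.length + 1 ≤ 2 * k := by omega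
      unfold pvChunk
      have hXlen : (l.take (l.length - 1) ++ "" :: l.drop (l.length - 1)).length
          = l.length + 1 := by
        simp only [List.length_append, List.length_cons, hPlen, hdlen]; omega
      rw [List.drop_append, List.drop_eq_nil_of_le (by rw [hXlen]; omega), hXlen,
          List.nil_append, List.drop_replicate, List.take_replicate]
      have hm : min 2 (n - (l.length + 1) - (2 * k - (l.length + 1))) = 2 := by omega
      rw [hm, List.drop_eq_nil_of_le (show l.length ≤ 2 * k by omega)]
      rfl

-- pvRows4 on two equal even-length lists is the chunk-concatenation map
theorem pvRows4_eq (m : Nat) : ∀ l1 l2 : List String, l1.length = 2 * m → l2.length = 2 * m →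
    pvRows4 l1 l2 = (List.range m).map (fun k => pvChunk l1 k ++ pvChunk l2 k) := by
  induction m with
  | zero =>
    intro l1 l2 h1 h2
    have : l1 = [] := List.eq_nil_of_length_eq_zero (by omega)
    have : l2 = [] := List.eq_nil_of_length_eq_zero (by omega)
    subst_vars
    rfl
  | succ m ih =>
    intro l1 l2 h1 h2
    match l1, l2 with
    | a :: b :: t1, c :: d :: t2 =>
      have ht1 : t1.length = 2 * m := by simp at h1; omega
      have ht2 : t2.length = 2 * m := by simp at h2; omega
      show [a, b, c, d] :: pvRows4 t1 t2 = _
      rw [ih t1 t2 ht1 ht2, List.range_succ_eq_map, List.map_cons, List.map_map]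
      have hhead : pvChunk (a :: b :: t1) 0 ++ pvChunk (c :: d :: t2) 0 = [a, b, c, d] := rfl
      rw [hhead]
      refine congrArg ([a, b, c, d] :: ·) ?_
      apply List.map_congr_left
      intro k _
      have hc1 : pvChunk (a :: b :: t1) (k + 1) = pvChunk t1 k := by
        unfold pvChunk
        have : 2 * (k + 1) = (2 * k) + 1 + 1 := by omega
        rw [this, List.drop_succ_cons, List.drop_succ_cons]
      have hc2 : pvChunk (c :: d :: t2) (k + 1) = pvChunk t2 k := by
        unfold pvChunk
        have : 2 * (k + 1) = (2 * k) + 1 + 1 := by omega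
        rw [this, List.drop_succ_cons, List.drop_succ_cons]
      simp [Function.comp, hc1, hc2]
    | [], _ =>
      simp only [List.length_nil] at h1
      omega
    | [_], _ =>
      simp only [List.length_cons, List.length_nil] at h1
      omega
    | _ :: _ :: _, [] =>
      simp only [List.length_nil] at h2
      omega
    | _ :: _ :: _, [_] =>
      simp only [List.length_cons, List.length_nil] at h2
      omega

theorem pvMain (ex ext : List String) : pvRowsA ex ext = pvRowsB ex ext := by
  rw [pvRowsA_norm]
  unfold pvRowsB
  set n0 := max ex.length ext.length with hn0
  set n := n0 + n0 % 2 with hn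
  have hne : n % 2 = 0 := by omega
  have hex : ex.length ≤ n := by omega
  -- length of the (possibly inserted-into) external list
  by_cases hodd : ext.length % 2 = 1
  · have hextn : ext.length + 1 ≤ n := by omega
    simp only [hodd, if_true]
    have hcast : ((ext.length : Int) - 1) = ((ext.length - 1 : Nat) : Int) := by omega
    rw [hcast, PySem.List.insert_natCast ext (ext.length - 1) "" (by omega)]
    have hlins : (ext.take (ext.length - 1) ++ "" :: ext.drop (ext.length - 1)).length
        = ext.length + 1 := by simp only [List.length_append, List.length_cons, List.length_take, List.length_drop]; omega
    rw [hlins]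
    have hlen1 : (ex ++ List.replicate (n - ex.length) "").length = n := by simp; omega
    have hlen2 : ((ext.take (ext.length - 1) ++ "" :: ext.drop (ext.length - 1))
        ++ List.replicate (n - (ext.length + 1)) "").length = n := by simp; omega
    rw [pvRows4_eq (n / 2) _ _ (by rw [hlen1]; omega) (by rw [hlen2]; omega)]
    have hr : (n0 + 1) / 2 = n / 2 := by omega
    rw [hr]
    apply List.map_congr_left
    intro k hk
    simp only [List.mem_range] at hk
    rw [pvChunkPadR ex n k hex (by omega), pvChunkExtOdd ext n k hodd hextn (by omega)]
  · have heven : ext.length % 2 = 0 := by omega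
    have hextn : ext.length ≤ n := by omega
    simp only [hodd, if_false]
    have hlen1 : (ex ++ List.replicate (n - ex.length) "").length = n := by simp; omega
    have hlen2 : (ext ++ List.replicate (n - ext.length) "").length = n := by simp; omega
    rw [pvRows4_eq (n / 2) _ _ (by rw [hlen1]; omega) (by rw [hlen2]; omega)]
    have hr : (n0 + 1) / 2 = n / 2 := by omega
    rw [hr]
    apply List.map_congr_left
    intro k hk
    simp only [List.mem_range] at hk
    rw [pvChunkPadR ex n k hex (by omega), pvChunkPadR ext n k hextn (by omega),
        pvPadLR_even ext k heven]

-- ===== VERDICT (by name: the statement is the Claim_ definition above) =====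
theorem get_examiner_table_rows_spec : Claim_equal_get_examiner_table_rows := by
  intro excel_data _ hpre
  obtain ⟨h1, h2⟩ := hpre
  obtain ⟨ex, he⟩ := Option.isSome_iff_exists.mp h1
  obtain ⟨ext, hx⟩ := Option.isSome_iff_exists.mp h2
  unfold Spec_get_examiner_table_rows get_examiner_table_rows get_examiner_table_rows_alt
  rw [he, hx]
  exact pvMain ex ext
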